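-- pv_equiv track=rewrite | github.com/margot-mitchell/rdoc_menstrual_classifier | src/simulation/utils.py | get_subphase_boundaries
-- ===== SOURCE A (Python) =====
-- def get_subphase_boundaries(phase_durations):
--     boundaries = {}
--     current_day = 0
--     for phase, duration in phase_durations.items():
--         start_day = current_day + 1
--         end_day = current_day + duration
--         boundaries[phase] = (start_day, end_day)
--         current_day = end_day
--     return boundaries
-- ===== SOURCE B (Python) =====
-- def get_subphase_boundaries(phase_durations):
--     # Pass 1: prefix-sum table of cumulative end days.
--     keys = list(phase_durations)
--     durs = list(phase_durations.values())
--     ends = []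
--     total = 0
--     for d in durs:
--         total += d
--         ends.append(total)
--     # Pass 2: assemble; start[i] is previous end + 1 (zip truncates [0]+ends).
--     return {k: (prev + 1, e) for k, prev, e in zip(keys, [0] + ends, ends)}
-- ===== Notes on version B (the rewrite author's own statement) =====
-- stated objective: alternative
-- what changed: Replaces the single running-day accumulator loop by two passes: first a prefix-sum table of cumulative end days, then a zip-based assembly computing each start as the previous end + 1.
import Mathlib
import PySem

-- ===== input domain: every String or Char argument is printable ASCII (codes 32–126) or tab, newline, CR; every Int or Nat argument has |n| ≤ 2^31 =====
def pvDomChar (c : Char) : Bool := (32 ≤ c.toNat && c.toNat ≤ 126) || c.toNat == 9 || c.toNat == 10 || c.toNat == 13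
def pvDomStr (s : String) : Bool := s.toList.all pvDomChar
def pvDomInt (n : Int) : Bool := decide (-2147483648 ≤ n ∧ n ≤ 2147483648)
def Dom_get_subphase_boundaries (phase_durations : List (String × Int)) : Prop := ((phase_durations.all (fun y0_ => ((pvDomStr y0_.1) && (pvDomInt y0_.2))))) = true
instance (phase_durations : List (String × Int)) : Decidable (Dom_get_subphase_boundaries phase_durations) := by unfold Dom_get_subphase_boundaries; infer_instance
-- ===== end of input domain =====

-- B replaces A's single running-day accumulator loop by two passes: a prefix-sum table of
-- cumulative end days, then a zip-based assembly (start = previous end + 1); same O(n) cost.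


-- ===== PORT A =====
def get_subphase_boundaries (phase_durations : List (String × Int)) : List (String × Int × Int) :=
  -- boundaries = {}; current_day = 0; for phase, duration in …: …
  (phase_durations.foldl
    (fun (st : PySem.Dict String (Int × Int) × Int) p =>
      let start_day := st.2 + 1
      let end_day := st.2 + p.2
      (st.1.insert p.1 (start_day, end_day), end_day))
    (PySem.Dict.empty, 0)).1.items

-- ===== PORT B =====
def get_subphase_boundaries_alt (phase_durations : List (String × Int)) : List (String × Int × Int) :=
  let keys := phase_durations.map (·.1)
  let durs := phase_durations.map (·.2)
  -- pass 1: prefix-sum table of cumulative end days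
  let ends := (durs.foldl (fun (st : List Int × Int) d => (st.1 ++ [st.2 + d], st.2 + d)) ([], 0)).1
  -- pass 2: zip-based assembly (zip truncates the over-long 0 :: ends)
  (keys.zip ((0 :: ends).zip ends)).map (fun kpe => (kpe.1, kpe.2.1 + 1, kpe.2.2))

-- ===== PRECONDITION & SPEC =====
-- Pre_ excludes association lists with duplicate keys: a Python dict argument can never contain
-- them, so A never receives such an input (on them A's overwrite-in-place and B's zip would differ).
def Pre_get_subphase_boundaries (phase_durations : List (String × Int)) : Prop :=
  (phase_durations.map Prod.fst).Nodup
instance (phase_durations : List (String × Int)) : Decidable (Pre_get_subphase_boundaries phase_durations) := by unfold Pre_get_subphase_boundaries; infer_instance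

def pvWitness_get_subphase_boundaries : (List (String × Int)) := [("menstrual", 5), ("follicular", 9)]

def Spec_get_subphase_boundaries (phase_durations : List (String × Int)) (out : List (String × Int × Int)) : Prop := out = get_subphase_boundaries_alt phase_durations
instance (phase_durations : List (String × Int)) (out : List (String × Int × Int)) : Decidable (Spec_get_subphase_boundaries phase_durations out) := by unfold Spec_get_subphase_boundaries; infer_instance

-- ===== CLAIM (what is proved, stated in full; the proofs are below) =====
def Claim_equal_get_subphase_boundaries : Prop := ∀ (phase_durations : List (String × Int)), Dom_get_subphase_boundaries phase_durations → Pre_get_subphase_boundaries phase_durations → Spec_get_subphase_boundaries phase_durations (get_subphase_boundaries phase_durations)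

-- ===== LEMMAS AND PROOFS =====

-- canonical result: (key, prev+1, prev+dur) along the running total starting at c
def pvSpecList : List (String × Int) → Int → List (String × Int × Int)
  | [], _ => []
  | (k, d) :: rest, c => (k, c + 1, c + d) :: pvSpecList rest (c + d)

-- prefix-sum table starting from running total t
def pvEnds : List Int → Int → List Int
  | [], _ => []
  | d :: ds, t => (t + d) :: pvEnds ds (t + d)

theorem pvEnds_foldl (durs : List Int) (acc : List Int) (t : Int) :
    (durs.foldl (fun (st : List Int × Int) d => (st.1 ++ [st.2 + d], st.2 + d)) (acc, t)).1
      = acc ++ pvEnds durs t := by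
  induction durs generalizing acc t with
  | nil => simp [pvEnds]
  | cons d ds ih => simp [List.foldl, pvEnds, ih]

theorem pvAlt_spec (pd : List (String × Int)) (c : Int) :
    ((pd.map (·.1)).zip ((c :: pvEnds (pd.map (·.2)) c).zip (pvEnds (pd.map (·.2)) c))).map
      (fun kpe => (kpe.1, kpe.2.1 + 1, kpe.2.2)) = pvSpecList pd c := by
  induction pd generalizing c with
  | nil => simp [pvEnds, pvSpecList]
  | cons p rest ih =>
    obtain ⟨k, d⟩ := p
    simp only [List.map_cons, pvEnds, pvSpecList, List.zip_cons_cons]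
    cases hr : pvEnds (rest.map (·.2)) (c + d) with
    | nil =>
      cases rest with
      | nil => simp [pvSpecList]
      | cons q qs => simp [pvEnds] at hr
    | cons e es =>
      have := ih (c + d)
      rw [hr] at this
      simpa [List.zip_cons_cons, hr] using this

theorem pvA_items (pd : List (String × Int)) (d : PySem.Dict String (Int × Int)) (c : Int)
    (hfresh : ∀ p ∈ pd, d.contains p.1 = false) (hnd : (pd.map Prod.fst).Nodup) :
    ((pd.foldl
      (fun (st : PySem.Dict String (Int × Int) × Int) p =>
        (st.1.insert p.1 (st.2 + 1, st.2 + p.2), st.2 + p.2)) (d, c)).1).items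
      = d.items ++ pvSpecList pd c := by
  induction pd generalizing d c with
  | nil => simp [pvSpecList]
  | cons p rest ih =>
    obtain ⟨k, dur⟩ := p
    simp only [List.map_cons, List.nodup_cons] at hnd
    have hk : d.contains k = false := hfresh (k, dur) (List.mem_cons_self ..)
    have hfresh' : ∀ q ∈ rest, (d.insert k (c + 1, c + dur)).contains q.1 = false := by
      intro q hq
      rw [PySem.Dict.contains_insert]
      have hqk : (q.1 == k) = false := by
        simp only [beq_eq_false_iff_ne, ne_eq]
        intro h
        exact hnd.1 (h ▸ List.mem_map_of_mem hq)
      simp [hqk, hfresh q (List.mem_cons_of_mem _ hq)]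
    simp only [List.foldl_cons]
    rw [ih _ _ hfresh' hnd.2, PySem.Dict.items_insert_of_not_contains _ _ hk]
    simp [pvSpecList]

-- ===== VERDICT (by name: the statement is the Claim_ definition above) =====
theorem get_subphase_boundaries_spec : Claim_equal_get_subphase_boundaries := by
  intro pd _ hpre
  unfold Spec_get_subphase_boundaries
  have hA : get_subphase_boundaries pd = pvSpecList pd 0 := by
    have := pvA_items pd PySem.Dict.empty 0 (fun p _ => PySem.Dict.contains_empty _) hpre
    simpa [get_subphase_boundaries] using this
  have hB : get_subphase_boundaries_alt pd = pvSpecList pd 0 := by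
    simp only [get_subphase_boundaries_alt]
    rw [pvEnds_foldl]
    simpa using pvAlt_spec pd 0
  rw [hA, hB]
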